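-- pv_equiv track=rewrite | github.com/Rositsazz/hack33 | hack33/users/helpers/fitness.py | get_class_rating
-- ===== SOURCE A (Python) =====
-- POINTS = 5
--
-- def get_class_rating(week_schedule):
--     ordered = True
--     for day, schedule in week_schedule.items():
--         for i in range(len(schedule) - 1):
--             current = schedule[i]
--             if current in schedule[i+1:len(schedule)]:
--                 if schedule[i] != schedule[i+1]:
--                     ordered = False
--                     break
--     if ordered:
--         return POINTS
--     return 0
-- ===== SOURCE B (Python) =====
-- POINTS = 5
--
-- def get_class_rating(week_schedule):
--     # One linear pass per day with a 'seen' set: a day is bad iff some value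
--     # reappears after a different value has intervened.
--     for day, schedule in week_schedule.items():
--         seen = set()
--         prev = None
--         for v in schedule:
--             if v != prev and v in seen:
--                 return 0
--             seen.add(v)
--             prev = v
--     return POINTS
-- ===== Notes on version B (the rewrite author's own statement) =====
-- stated objective: faster
-- what changed: Replaces the per-index membership scan of the tail (schedule[i] in schedule[i+1:]) by a single left-to-right pass per day that maintains a set of already-seen values and the previous element, returning 0 as soon as a value reappears non-adjacently.
import Mathlib
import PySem

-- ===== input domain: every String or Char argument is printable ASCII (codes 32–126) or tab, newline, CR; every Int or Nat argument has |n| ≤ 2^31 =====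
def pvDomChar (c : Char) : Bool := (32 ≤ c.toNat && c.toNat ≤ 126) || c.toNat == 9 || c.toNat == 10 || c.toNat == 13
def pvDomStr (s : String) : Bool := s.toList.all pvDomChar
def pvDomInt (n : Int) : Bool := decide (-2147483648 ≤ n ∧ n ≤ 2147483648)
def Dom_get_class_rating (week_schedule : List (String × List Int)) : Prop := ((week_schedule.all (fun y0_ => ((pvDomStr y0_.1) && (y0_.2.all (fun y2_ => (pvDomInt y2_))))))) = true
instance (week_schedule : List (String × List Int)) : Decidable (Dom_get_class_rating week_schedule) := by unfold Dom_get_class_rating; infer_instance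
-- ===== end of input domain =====

-- B replaces A's per-index membership scan of the tail by one linear pass per day with a seen-set (objective: faster).

-- ===== PORT A =====
-- inner 'for i in range(len(schedule)-1)' loop; every index is in range, so pyGetD's default 0 is never used
def pvAInner (schedule : List Int) : List Int → Bool → Bool
  | [], ordered => ordered
  | i :: rest, ordered =>
      let current := PySem.List.pyGetD schedule i 0
      if (PySem.List.slice schedule (some (i+1)) (some (schedule.length : Int))).contains current then
        if PySem.List.pyGetD schedule i 0 ≠ PySem.List.pyGetD schedule (i+1) 0 then
          false                      -- ordered = False; break
        else pvAInner schedule rest ordered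
      else pvAInner schedule rest ordered

def get_class_rating (week_schedule : List (String × List Int)) : Int :=
  let ordered := week_schedule.foldl
    (fun ordered dp => pvAInner dp.2 (PySem.List.pyRange 0 ((dp.2.length : Int) - 1) 1) ordered) true
  if ordered then 5 else 0

-- ===== PORT B =====
-- 'for v in schedule' with seen-set and prev; returns true = the 'return 0' path fired
def pvBScan : List Int → PySem.Set Int → Option Int → Bool
  | [], _, _ => false
  | v :: rest, seen, prev =>
      if some v ≠ prev ∧ v ∈ seen then true          -- 'if v != prev and v in seen: return 0'
      else pvBScan rest (PySem.Set.add seen v) (some v)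

def get_class_rating_alt : List (String × List Int) → Int
  | [] => 5
  | (_, s) :: rest => if pvBScan s PySem.Set.empty none then 0 else get_class_rating_alt rest

-- ===== PRECONDITION & SPEC =====
def Spec_get_class_rating (week_schedule : List (String × List Int)) (out : Int) : Prop := out = get_class_rating_alt week_schedule
instance (week_schedule : List (String × List Int)) (out : Int) : Decidable (Spec_get_class_rating week_schedule out) := by unfold Spec_get_class_rating; infer_instance

-- ===== CLAIM (what is proved, stated in full; the proofs are below) =====
def Claim_equal_get_class_rating : Prop := ∀ (week_schedule : List (String × List Int)), Dom_get_class_rating week_schedule → Spec_get_class_rating week_schedule (get_class_rating week_schedule)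

-- ===== LEMMAS AND PROOFS =====

-- 'some value recurs non-adjacently', phrased as A's index loop sees it
def PA (s : List Int) : Prop :=
  ∃ i : Nat, i + 1 < s.length ∧ s.getD i 0 ∈ s.drop (i+1) ∧ s.getD i 0 ≠ s.getD (i+1) 0

-- the same, phrased as B's scan sees it
def PB (s : List Int) : Prop :=
  ∃ j : Nat, j < s.length ∧ 0 < j ∧ s.getD j 0 ∈ s.take j ∧ s.getD j 0 ≠ s.getD (j-1) 0

lemma getD_mem_take (s : List Int) (k m : Nat) (h1 : k < s.length) (h2 : k < m) :
    s.getD k 0 ∈ s.take m := by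
  rw [List.getD_eq_getElem s 0 h1]
  exact List.mem_iff_getElem.mpr ⟨k, by simp [h1, h2], by rw [List.getElem_take]⟩

lemma getD_mem_drop (s : List Int) (k m : Nat) (h1 : k < s.length) (h2 : m ≤ k) :
    s.getD k 0 ∈ s.drop m := by
  obtain ⟨t, rfl⟩ : ∃ t, k = m + t := ⟨k - m, by omega⟩
  rw [List.getD_eq_getElem s 0 h1]
  exact List.mem_iff_getElem.mpr ⟨t, by simp; omega, by rw [List.getElem_drop]⟩

lemma mem_take_exists (s : List Int) (m : Nat) (x : Int) (h : x ∈ s.take m) :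
    ∃ k, k < m ∧ k < s.length ∧ s.getD k 0 = x := by
  rcases List.mem_iff_getElem.mp h with ⟨k, hk, he⟩
  have hk' : k < m ∧ k < s.length := by simp at hk; omega
  exact ⟨k, hk'.1, hk'.2, by rw [List.getD_eq_getElem s 0 hk'.2, ← he, List.getElem_take]⟩

lemma mem_drop_exists (s : List Int) (m : Nat) (x : Int) (h : x ∈ s.drop m) :
    ∃ k, m ≤ k ∧ k < s.length ∧ s.getD k 0 = x := by
  rcases List.mem_iff_getElem.mp h with ⟨t, ht, he⟩
  have ht' : m + t < s.length := by simp at ht; omega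
  exact ⟨m + t, by omega, ht', by rw [List.getD_eq_getElem s 0 ht', ← he, List.getElem_drop]⟩

lemma pvAInner_false (s : List Int) (l : List Int) : pvAInner s l false = false := by
  induction l with
  | nil => rfl
  | cons i rest ih => simp only [pvAInner]; split_ifs <;> simp [ih]

lemma pvAInner_true (s : List Int) (l : List Int) :
    pvAInner s l true =
      !(l.any (fun i => (PySem.List.slice s (some (i+1)) (some (s.length : Int))).contains
          (PySem.List.pyGetD s i 0) &&
          (PySem.List.pyGetD s i 0 != PySem.List.pyGetD s (i+1) 0))) := by
  induction l with
  | nil => rfl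
  | cons i rest ih =>
      simp only [pvAInner, List.any_cons]
      split_ifs with h1 h2 <;> simp_all

lemma condA_iff (s : List Int) (i : Nat) (h : i + 1 < s.length) :
    ((PySem.List.slice s (some ((i:Int)+1)) (some (s.length:Int))).contains (PySem.List.pyGetD s (i:Int) 0)
      && (PySem.List.pyGetD s (i:Int) 0 != PySem.List.pyGetD s ((i:Int)+1) 0)) = true
    ↔ (s.getD i 0 ∈ s.drop (i+1) ∧ s.getD i 0 ≠ s.getD (i+1) 0) := by
  rw [PySem.List.slice_toNat s (by positivity) (by positivity)]
  have h1 : ((i:Int)+1).toNat = i + 1 := by omega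
  have h2 : ((s.length : Int)).toNat = s.length := by omega
  have h3 : ((i:Int)+1) = ((i+1 : Nat) : Int) := by push_cast; ring
  rw [h1, h2, List.take_of_length_le (by simp), h3,
    PySem.List.pyGetD_natCast, PySem.List.pyGetD_natCast]
  simp [bne_iff_ne]

lemma pvAInner_range_iff (s : List Int) :
    pvAInner s (PySem.List.pyRange 0 ((s.length : Int) - 1) 1) true = true ↔ ¬ PA s := by
  have key : ((PySem.List.pyRange 0 ((s.length : Int) - 1) 1).any
      (fun i => (PySem.List.slice s (some (i+1)) (some (s.length : Int))).contains
          (PySem.List.pyGetD s i 0) &&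
          (PySem.List.pyGetD s i 0 != PySem.List.pyGetD s (i+1) 0))) = true ↔ PA s := by
    simp only [List.any_eq_true]
    constructor
    · rintro ⟨x, hx, hf⟩
      rw [PySem.List.mem_pyRange_one] at hx
      obtain ⟨h0, h1⟩ := hx
      obtain ⟨i, rfl⟩ : ∃ i : Nat, x = (i : Int) := ⟨x.toNat, by omega⟩
      have hi : i + 1 < s.length := by omega
      exact ⟨i, hi, (condA_iff s i hi).mp hf⟩
    · rintro ⟨i, hi, hc⟩
      exact ⟨(i : Int), PySem.List.mem_pyRange_one.mpr ⟨by positivity, by omega⟩,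
        (condA_iff s i hi).mpr hc⟩
  rw [pvAInner_true, ← key]
  cases h : (PySem.List.pyRange 0 ((s.length : Int) - 1) 1).any _ <;> simp

lemma pvBScan_iff : ∀ (s : List Int) (seen : PySem.Set Int) (prev : Option Int),
    pvBScan s seen prev = true ↔
      ∃ j : Nat, j < s.length ∧
        (s.getD j 0 ∈ seen ∨ s.getD j 0 ∈ s.take j) ∧
        (if j = 0 then prev else some (s.getD (j-1) 0)) ≠ some (s.getD j 0)
  | [], seen, prev => by simp [pvBScan]
  | v :: rest, seen, prev => by
      simp only [pvBScan]
      split_ifs with h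
      · simp only [true_iff]
        exact ⟨0, by simp, Or.inl (by simpa using h.2), by simpa using h.1.symm⟩
      · rw [pvBScan_iff rest (PySem.Set.add seen v) (some v)]
        constructor
        · rintro ⟨j, hj, hmem, hne⟩
          refine ⟨j+1, by simpa using hj, ?_, ?_⟩
          · simp only [List.getD_cons_succ, List.take_succ_cons, List.mem_cons]
            rcases hmem with hm | hm
            · rcases (PySem.Set.mem_add seen v _).mp hm with h' | h'
              · exact Or.inl h'
              · exact Or.inr (Or.inl h')
            · exact Or.inr (Or.inr hm)
          · simp only [Nat.add_sub_cancel, if_neg (Nat.succ_ne_zero j), List.getD_cons_succ]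
            rcases Nat.eq_zero_or_pos j with rfl | hpos
            · simpa using hne
            · have hg : (v :: rest).getD j 0 = rest.getD (j-1) 0 := by
                rcases j with _ | j'
                · omega
                · simp
              rw [hg]
              simpa [if_neg (by omega : ¬ j = 0)] using hne
        · rintro ⟨j, hj, hmem, hne⟩
          rcases j with _ | j'
          · exfalso
            apply h
            simp only [List.getD_cons_zero, List.take_zero, List.not_mem_nil, or_false] at hmem
            simp only [List.getD_cons_zero] at hne
            exact ⟨hne.symm, hmem⟩
          · refine ⟨j', by simpa using hj, ?_, ?_⟩
            · simp only [List.getD_cons_succ] at hmem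
              rcases hmem with hm | hm
              · exact Or.inl ((PySem.Set.mem_add seen v _).mpr (Or.inl hm))
              · rw [List.take_succ_cons, List.mem_cons] at hm
                rcases hm with hm | hm
                · exact Or.inl ((PySem.Set.mem_add seen v _).mpr (Or.inr hm))
                · exact Or.inr hm
            · simp only [if_neg (Nat.succ_ne_zero j'), Nat.add_sub_cancel, List.getD_cons_succ] at hne
              rcases Nat.eq_zero_or_pos j' with rfl | hpos
              · simpa using hne
              · have hg : (v :: rest).getD j' 0 = rest.getD (j'-1) 0 := by
                  rcases j' with _ | j''
                  · omega
                  · simp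
                rw [hg] at hne
                simpa [if_neg (by omega : ¬ j' = 0)] using hne

lemma pvBScan_start_iff (s : List Int) :
    pvBScan s PySem.Set.empty none = true ↔ PB s := by
  rw [pvBScan_iff]
  constructor
  · rintro ⟨j, hj, hmem, hne⟩
    rcases Nat.eq_zero_or_pos j with rfl | hpos
    · simp [PySem.Set.empty] at hmem
    · refine ⟨j, hj, hpos, ?_, ?_⟩
      · rcases hmem with hm | hm
        · simp [PySem.Set.empty] at hm
        · exact hm
      · intro he
        exact hne (by rw [if_neg (by omega : ¬ j = 0), he])
  · rintro ⟨j, hj, hpos, hmem, hne⟩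
    refine ⟨j, hj, Or.inr hmem, ?_⟩
    rw [if_neg (by omega : ¬ j = 0)]
    exact fun he => hne (Option.some_injective _ he).symm

lemma PA_iff_PB (s : List Int) : PA s ↔ PB s := by
  constructor
  · rintro ⟨i, hi, hmem, hne⟩
    obtain ⟨j₀, hj₀m, hj₀len, hj₀v⟩ := mem_drop_exists s (i+1) _ hmem
    have hii : i + 1 < j₀ := by
      have : i + 1 ≠ j₀ := fun he => hne (by rw [he]; exact hj₀v.symm)
      omega
    have hPnext : s.getD (i+1) 0 ≠ s.getD i 0 := Ne.symm hne
    obtain ⟨k, hkdef⟩ : ∃ k, k = Nat.findGreatest (fun t => s.getD t 0 ≠ s.getD i 0) (j₀ - 1) := ⟨_, rfl⟩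
    have hkge : i + 1 ≤ k := hkdef ▸ Nat.le_findGreatest (by omega) hPnext
    have hkP : s.getD k 0 ≠ s.getD i 0 := by
      rw [hkdef]
      exact Nat.findGreatest_spec (P := fun t => s.getD t 0 ≠ s.getD i 0) (by omega) hPnext
    have hkle : k ≤ j₀ - 1 := hkdef ▸ Nat.findGreatest_le _
    have hnext : s.getD (k+1) 0 = s.getD i 0 := by
      rcases eq_or_lt_of_le (show k+1 ≤ j₀ by omega) with he | hlt
      · rw [he]; exact hj₀v
      · by_contra hne2
        exact Nat.findGreatest_is_greatest (by rw [← hkdef]; omega) (by omega : k+1 ≤ j₀-1) hne2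
    refine ⟨k+1, by omega, by omega, ?_, ?_⟩
    · rw [hnext]
      exact getD_mem_take s i (k+1) (by omega) (by omega)
    · simp only [Nat.add_sub_cancel]
      rw [hnext]
      exact fun he => hkP he.symm
  · rintro ⟨j, hj, hjpos, hmem, hne⟩
    obtain ⟨i, him, hilen, hiv⟩ := mem_take_exists s j _ hmem
    have hij : i < j - 1 := by
      have : i ≠ j - 1 := fun he => hne (by rw [← hiv, he])
      omega
    have hQi : s.getD i 0 = s.getD j 0 := hiv
    obtain ⟨i₀, hi0⟩ : ∃ i₀, i₀ = Nat.findGreatest (fun t => s.getD t 0 = s.getD j 0) (j - 2) := ⟨_, rfl⟩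
    have hge : i ≤ i₀ := hi0 ▸ Nat.le_findGreatest (by omega) hQi
    have hQ : s.getD i₀ 0 = s.getD j 0 := by
      rw [hi0]
      exact Nat.findGreatest_spec (P := fun t => s.getD t 0 = s.getD j 0) (by omega) hQi
    have hle : i₀ ≤ j - 2 := hi0 ▸ Nat.findGreatest_le _
    have hnext : s.getD (i₀+1) 0 ≠ s.getD j 0 := by
      rcases eq_or_lt_of_le (show i₀ + 1 ≤ j - 1 by omega) with he | hlt
      · rw [he]; exact fun h2 => hne h2.symm
      · exact Nat.findGreatest_is_greatest (by rw [← hi0]; omega) (by omega : i₀+1 ≤ j-2)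
    refine ⟨i₀, by omega, ?_, ?_⟩
    · rw [hQ]
      exact getD_mem_drop s j (i₀+1) hj (by omega)
    · rw [hQ]
      exact fun he => hnext he.symm

lemma perDay (s : List Int) :
    pvAInner s (PySem.List.pyRange 0 ((s.length : Int) - 1) 1) true
      = !pvBScan s PySem.Set.empty none := by
  rcases h : pvBScan s PySem.Set.empty none with _ | _
  · have hb := (pvBScan_start_iff s)
    rw [h] at hb
    simp only [Bool.not_false]
    rw [pvAInner_range_iff, PA_iff_PB]
    simp [← hb]
  · have hb : PB s := (pvBScan_start_iff s).mp h
    simp only [Bool.not_true]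
    rcases hA : pvAInner s (PySem.List.pyRange 0 ((s.length : Int) - 1) 1) true with _ | _
    · rfl
    · exact absurd ((PA_iff_PB s).mpr hb) ((pvAInner_range_iff s).mp hA)

lemma foldA (ws : List (String × List Int)) :
    ws.foldl (fun ordered dp => pvAInner dp.2 (PySem.List.pyRange 0 ((dp.2.length : Int) - 1) 1) ordered) true
      = ws.all (fun dp => pvAInner dp.2 (PySem.List.pyRange 0 ((dp.2.length : Int) - 1) 1) true) := by
  induction ws with
  | nil => rfl
  | cons p rest ih =>
      simp only [List.foldl_cons, List.all_cons]
      rcases h : pvAInner p.2 (PySem.List.pyRange 0 ((p.2.length : Int) - 1) 1) true with _ | _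
      · simp only [Bool.false_and]
        clear h ih
        induction rest with
        | nil => rfl
        | cons q r ihr => simp only [List.foldl_cons, pvAInner_false]; exact ihr
      · simp [ih]

lemma altEq (ws : List (String × List Int)) :
    get_class_rating_alt ws = if ws.all (fun dp => !pvBScan dp.2 PySem.Set.empty none) then 5 else 0 := by
  induction ws with
  | nil => rfl
  | cons p rest ih =>
      rcases p with ⟨d, s⟩
      rw [show get_class_rating_alt ((d,s)::rest)
            = if pvBScan s PySem.Set.empty none then 0 else get_class_rating_alt rest from rfl,
          List.all_cons, ih]
      cases h : pvBScan s PySem.Set.empty none <;> simp only [Bool.not_false, Bool.not_true, Bool.true_and, Bool.false_and, if_true] <;> simp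

-- ===== VERDICT (by name: the statement is the Claim_ definition above) =====
theorem get_class_rating_spec : Claim_equal_get_class_rating := by
  intro ws _
  unfold Spec_get_class_rating get_class_rating
  rw [altEq]
  simp only [foldA]
  have hall : (ws.all (fun dp => pvAInner dp.2 (PySem.List.pyRange 0 ((dp.2.length : Int) - 1) 1) true))
      = ws.all (fun dp => !pvBScan dp.2 PySem.Set.empty none) :=
    List.all_congr rfl (fun dp => perDay dp.2)
  rw [hall]
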